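-- pv_equiv track=rewrite | github.com/mpifr-vlbi/apex-tools | APECS/2024/vex2apecs.py | coordReformatVex2Apecs
-- ===== SOURCE A (Python) =====
-- def coordReformatVex2Apecs(s):
-- 	'''
-- 	Reformat VEX-style coordinates into APECS format, i.e.
-- 	VEX RA   13h25m27.6152000s  --> APECS   13:25:27.6152000
-- 	VEX DEC -43d01'08.805000"   --> APECS  -43:01:08.80500
-- 	'''
-- 	s = s.strip()
-- 	repl = list('hmd\'')
-- 	for c in repl:
-- 		s = s.replace(c,':')
-- 	s = s.replace('s','')
-- 	s = s.replace('"','')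
-- 	return s
-- ===== SOURCE B (Python) =====
-- def coordReformatVex2Apecs(s):
-- 	'''
-- 	Reformat VEX-style coordinates into APECS format, i.e.
-- 	VEX RA   13h25m27.6152000s  --> APECS   13:25:27.6152000
-- 	VEX DEC -43d01'08.805000"   --> APECS  -43:01:08.80500
-- 	'''
-- 	s = s.strip()
-- 	table = {'h': ':', 'm': ':', 'd': ':', "'": ':', 's': '', '"': ''}
-- 	out = []
-- 	for c in s:
-- 		out.append(table.get(c, c))
-- 	return ''.join(out)
-- ===== Notes on version B (the rewrite author's own statement) =====
-- stated objective: alternative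
-- what changed: Replaced A's six sequential full-string replace passes by a character-to-replacement table and one explicit pass over the stripped string that appends each mapped piece and joins the result.
import Mathlib
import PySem

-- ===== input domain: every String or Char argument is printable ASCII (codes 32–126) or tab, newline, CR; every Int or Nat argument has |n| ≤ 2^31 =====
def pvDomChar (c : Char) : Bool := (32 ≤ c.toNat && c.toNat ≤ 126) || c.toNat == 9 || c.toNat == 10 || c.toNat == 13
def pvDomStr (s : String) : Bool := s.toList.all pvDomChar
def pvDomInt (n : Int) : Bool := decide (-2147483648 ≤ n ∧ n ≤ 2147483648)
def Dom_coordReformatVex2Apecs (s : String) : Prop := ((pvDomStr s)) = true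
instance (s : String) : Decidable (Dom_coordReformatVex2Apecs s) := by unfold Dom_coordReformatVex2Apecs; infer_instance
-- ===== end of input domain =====

-- B replaces A's six sequential full-string replace passes by a lookup table and one pass over the characters (alternative decomposition, same cost class).

-- ===== PORT A =====
def coordReformatVex2Apecs (s : String) : String :=
  let s := PySem.Str.strip s
  let repl : List Char := ['h', 'm', 'd', '\'']
  let s := repl.foldl (fun s c => PySem.Str.replace s (String.ofList [c]) ":") s
  let s := PySem.Str.replace s "s" ""
  let s := PySem.Str.replace s "\"" ""
  s

-- ===== PORT B =====
def coordReformatVex2Apecs_alt (s : String) : String :=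
  let s := PySem.Str.strip s
  let table : PySem.Dict Char String :=
    PySem.Dict.mk [('h', ":"), ('m', ":"), ('d', ":"), ('\'', ":"), ('s', ""), ('"', "")]
  let out := s.toList.foldl (fun acc c => acc ++ [table.getD c (String.ofList [c])]) []
  PySem.Str.join "" out

-- ===== PRECONDITION & SPEC =====
def Spec_coordReformatVex2Apecs (s : String) (out : String) : Prop := out = coordReformatVex2Apecs_alt s
instance (s : String) (out : String) : Decidable (Spec_coordReformatVex2Apecs s out) := by unfold Spec_coordReformatVex2Apecs; infer_instance

-- ===== CLAIM (what is proved, stated in full; the proofs are below) =====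
def Claim_equal_coordReformatVex2Apecs : Prop := ∀ (s : String), Dom_coordReformatVex2Apecs s → Spec_coordReformatVex2Apecs s (coordReformatVex2Apecs s)

-- ===== LEMMAS AND PROOFS =====

-- replace with a single-char pattern is a flatMap over the characters
theorem pv_go_single (a : Char) (t : List Char) (fuel : Nat) :
    ∀ (l acc : List Char), PySem.Chars.replace.go [a] t fuel l acc =
      acc.reverse ++ (l.take fuel).flatMap (fun c => if c = a then t else [c]) ++ l.drop fuel := by
  induction fuel with
  | zero => intro l acc; simp [PySem.Chars.replace.go]
  | succ n ih =>
    intro l acc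
    cases l with
    | nil => simp [PySem.Chars.replace.go]
    | cons c rest =>
      rw [PySem.Chars.replace.go]
      by_cases h : c = a
      · subst h
        simp [List.isPrefixOf, ih]
      · have hp : [a].isPrefixOf (c :: rest) = false := by
          simp [List.isPrefixOf]; exact fun hca => (h hca.symm).elim
        simp [hp, ih, h]

theorem pv_replace_single (cs : List Char) (a : Char) (t : List Char) :
    PySem.Chars.replace cs [a] t = cs.flatMap (fun c => if c = a then t else [c]) := by
  rw [PySem.Chars.replace]
  simp [pv_go_single]

theorem pv_join_nil (l : List (List Char)) : PySem.Chars.join [] l = l.flatten := by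
  induction l with
  | nil => simp [PySem.Chars.join, List.intercalate]
  | cons x xs ih =>
    cases xs with
    | nil => simp [PySem.Chars.join, List.intercalate]
    | cons y ys =>
      simp [PySem.Chars.join, List.intercalate, List.intersperse] at ih ⊢
      simpa using ih

theorem pv_flatMap_ext {α β : Type} (l : List α) (f g : α → List β) (h : ∀ c, f c = g c) :
    l.flatMap f = l.flatMap g := by
  have : f = g := funext h
  rw [this]

-- the common character-level translation both ports reduce to
def pvG (c : Char) : List Char :=
  if c = 'h' ∨ c = 'm' ∨ c = 'd' ∨ c = '\'' then [':']
  else if c = 's' ∨ c = '"' then [] else [c]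

theorem pv_A_canon (s : String) :
    coordReformatVex2Apecs s = String.ofList ((PySem.Chars.strip s.toList).flatMap pvG) := by
  unfold coordReformatVex2Apecs
  dsimp only
  simp only [List.foldl, PySem.Str.replace, PySem.Str.strip, String.toList_ofList]
  refine congrArg String.ofList ?_
  have t0 : "".toList = ([] : List Char) := rfl
  have t1 : ":".toList = [':'] := rfl
  have t2 : "s".toList = ['s'] := rfl
  have t3 : "\"".toList = ['"'] := rfl
  rw [t0, t1, t2, t3]
  simp only [pv_replace_single, List.flatMap_assoc]
  refine pv_flatMap_ext _ _ _ ?_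
  intro c
  by_cases h1 : c = 'h'; · subst h1; decide
  by_cases h2 : c = 'm'; · subst h2; decide
  by_cases h3 : c = 'd'; · subst h3; decide
  by_cases h4 : c = '\''; · subst h4; decide
  by_cases h5 : c = 's'; · subst h5; decide
  by_cases h6 : c = '"'; · subst h6; decide
  simp [pvG, h1, h2, h3, h4, h5, h6]

theorem pv_B_canon (s : String) :
    coordReformatVex2Apecs_alt s = String.ofList ((PySem.Chars.strip s.toList).flatMap pvG) := by
  unfold coordReformatVex2Apecs_alt
  dsimp only
  simp only [PySem.Str.join, PySem.Str.toList_strip]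
  refine congrArg String.ofList ?_
  rw [PySem.List.foldl_append_eq_flatMap]
  simp only [List.nil_append]
  have t0 : "".toList = ([] : List Char) := rfl
  rw [t0, pv_join_nil]
  rw [← List.flatMap_def]
  simp only [List.flatMap_assoc]
  refine pv_flatMap_ext _ _ _ ?_
  intro c
  by_cases h1 : c = 'h'; · subst h1; decide
  by_cases h2 : c = 'm'; · subst h2; decide
  by_cases h3 : c = 'd'; · subst h3; decide
  by_cases h4 : c = '\''; · subst h4; decide
  by_cases h5 : c = 's'; · subst h5; decide
  by_cases h6 : c = '"'; · subst h6; decide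
  have e1 : ('h' == c) = false := beq_eq_false_iff_ne.mpr (Ne.symm h1)
  have e2 : ('m' == c) = false := beq_eq_false_iff_ne.mpr (Ne.symm h2)
  have e3 : ('d' == c) = false := beq_eq_false_iff_ne.mpr (Ne.symm h3)
  have e4 : ('\'' == c) = false := beq_eq_false_iff_ne.mpr (Ne.symm h4)
  have e5 : ('s' == c) = false := beq_eq_false_iff_ne.mpr (Ne.symm h5)
  have e6 : ('"' == c) = false := beq_eq_false_iff_ne.mpr (Ne.symm h6)
  simp [pvG, PySem.Dict.getD, PySem.Dict.get?, List.find?, h1, h2, h3, h4, h5, h6,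
    e1, e2, e3, e4, e5, e6]

-- ===== VERDICT (by name: the statement is the Claim_ definition above) =====
theorem coordReformatVex2Apecs_spec : Claim_equal_coordReformatVex2Apecs := by
  intro s _
  unfold Spec_coordReformatVex2Apecs
  rw [pv_A_canon, pv_B_canon]
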